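-- pv_equiv track=rewrite | github.com/RAM1R0-STR/python-practice-exercises | 1er_examen/ej3-separar_consonantes_vocales.py | ordenar_pal
-- ===== SOURCE A (Python) =====
-- def ordenar_pal(pal):
--     pal_der=""
--     pal_izq=""
--     vocales = "aeiou"
--     for char in pal:
--         if char in vocales:
--             pal_der = pal_der + char
--         else :
--             pal_izq = pal_izq + char
--     pal_ord =pal_izq+pal_der
--     return pal_ord
-- ===== SOURCE B (Python) =====
-- def ordenar_pal(pal):
--     vocales = "aeiou"
--     return ''.join(sorted(pal, key=lambda c: c in vocales))
-- ===== Notes on version B (the rewrite author's own statement) =====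
-- stated objective: idiomatic
-- what changed: Replaces the manual two-accumulator partition loop with a stable sort on a boolean key (consonants False before vowels True), letting sort stability preserve intra-group order.
import Mathlib
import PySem

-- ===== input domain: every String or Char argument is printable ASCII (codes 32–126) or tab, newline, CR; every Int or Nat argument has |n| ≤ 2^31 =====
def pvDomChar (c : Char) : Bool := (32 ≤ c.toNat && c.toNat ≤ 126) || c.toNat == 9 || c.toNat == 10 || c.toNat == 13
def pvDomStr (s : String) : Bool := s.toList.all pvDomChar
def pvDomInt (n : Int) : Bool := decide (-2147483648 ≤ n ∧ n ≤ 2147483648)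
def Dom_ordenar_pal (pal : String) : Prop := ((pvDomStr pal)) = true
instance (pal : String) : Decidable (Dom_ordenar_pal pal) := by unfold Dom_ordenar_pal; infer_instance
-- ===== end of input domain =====

-- B partitions consonants-before-vowels with a stable sort on a boolean key instead of A's two-accumulator loop.


-- ===== PORT A =====
-- two string accumulators, one pass; 'char in vocales' on a 1-char string = character membership
def ordenar_pal (pal : String) : String :=
  let vocales : List Char := "aeiou".toList
  let r := pal.toList.foldl
    (fun (st : List Char × List Char) char =>
      if char ∈ vocales then (st.1 ++ [char], st.2) else (st.1, st.2 ++ [char]))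
    ([], [])   -- (pal_der, pal_izq)
  String.mk (r.2 ++ r.1)

-- ===== PORT B =====
-- ''.join(sorted(pal, key=lambda c: c in vocales)) : stable sort on the boolean key
def ordenar_pal_alt (pal : String) : String :=
  String.mk (PySem.List.sorted pal.toList (fun c => decide (c ∈ "aeiou".toList)) false)

-- ===== PRECONDITION & SPEC =====
def Spec_ordenar_pal (pal : String) (out : String) : Prop := out = ordenar_pal_alt pal
instance (pal : String) (out : String) : Decidable (Spec_ordenar_pal pal out) := by unfold Spec_ordenar_pal; infer_instance

-- ===== CLAIM (what is proved, stated in full; the proofs are below) =====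
def Claim_equal_ordenar_pal : Prop := ∀ (pal : String), Dom_ordenar_pal pal → Spec_ordenar_pal pal (ordenar_pal pal)

-- ===== LEMMAS AND PROOFS =====

-- A's fold accumulates (vowels, consonants) as filters
lemma foldA_eq (k : List Char) (l d i : List Char) :
    l.foldl (fun (st : List Char × List Char) char =>
      if char ∈ k then (st.1 ++ [char], st.2) else (st.1, st.2 ++ [char])) (d, i)
    = (d ++ l.filter (fun c => decide (c ∈ k)), i ++ l.filter (fun c => !decide (c ∈ k))) := by
  induction l generalizing d i with
  | nil => simp
  | cons x t ih =>
    by_cases hx : x ∈ k <;> simp [hx, ih]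

-- inserting into a false-block ++ true-block keeps the shape, appending at the end of x's block
lemma insertBy_bool (k : Char → Bool) (x : Char) (F T : List Char)
    (hF : ∀ c ∈ F, k c = false) (hT : ∀ c ∈ T, k c = true) :
    PySem.List.insertBy (fun a b => decide (k a < k b)) x (F ++ T)
    = if k x then F ++ T ++ [x] else F ++ x :: T := by
  induction F with
  | nil =>
    cases T with
    | nil => cases hkx : k x <;> simp [PySem.List.insertBy]
    | cons y ys =>
      have hy : k y = true := hT y (by simp)
      cases hkx : k x with
      | false =>
        simp [PySem.List.insertBy, hy, hkx, Bool.lt_iff]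
      | true =>
        simp only [List.nil_append]
        have : ∀ (T' : List Char), (∀ c ∈ T', k c = true) →
            PySem.List.insertBy (fun a b => decide (k a < k b)) x T' = T' ++ [x] := by
          intro T' hT'
          induction T' with
          | nil => simp [PySem.List.insertBy]
          | cons z zs ihz =>
            have hz : k z = true := hT' z (by simp)
            have h2 := ihz (fun c hc => hT' c (by simp [hc]))
            simpa [PySem.List.insertBy, hz, hkx, Bool.lt_iff] using h2
        simp [this (y :: ys) hT]
  | cons f fs ihF =>
    have hf : k f = false := hF f (by simp)
    have ih := ihF (fun c hc => hF c (by simp [hc]))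
    cases hkx : k x with
    | false =>
      simp [PySem.List.insertBy, hf, hkx, Bool.lt_iff] at ih ⊢
      exact ih
    | true =>
      simp [PySem.List.insertBy, hf, hkx, Bool.lt_iff] at ih ⊢
      exact ih

-- the stable sort on a boolean key is exactly the two-filter partition
lemma sorted_bool (k : Char → Bool) (l : List Char) :
    PySem.List.sorted l k false
    = l.filter (fun c => !k c) ++ l.filter k := by
  rw [PySem.List.sorted_eq_foldl_insertBy]
  suffices h : ∀ (F T : List Char), (∀ c ∈ F, k c = false) → (∀ c ∈ T, k c = true) →
      l.foldl (fun acc x => PySem.List.insertBy (fun a b => decide (k a < k b)) x acc) (F ++ T)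
      = (F ++ l.filter (fun c => !k c)) ++ (T ++ l.filter k) by
    simpa using h [] [] (by simp) (by simp)
  induction l with
  | nil => simp
  | cons x t ih =>
    intro F T hF hT
    simp only [List.foldl_cons]
    rw [insertBy_bool k x F T hF hT]
    cases hx : k x with
    | false =>
      rw [if_neg Bool.false_ne_true]
      rw [show F ++ x :: T = (F ++ [x]) ++ T by simp]
      rw [ih (F ++ [x]) T ?_ hT]
      · simp [hx]
      · intro c hc
        rcases List.mem_append.1 hc with h | h
        · exact hF c h
        · simp at h; simp [h, hx]
    | true =>
      rw [if_pos rfl]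
      rw [show F ++ T ++ [x] = F ++ (T ++ [x]) by simp]
      rw [ih F (T ++ [x]) hF ?_]
      · simp [hx]
      · intro c hc
        rcases List.mem_append.1 hc with h | h
        · exact hT c h
        · simp at h; simp [h, hx]

-- ===== VERDICT (by name: the statement is the Claim_ definition above) =====
theorem ordenar_pal_spec : Claim_equal_ordenar_pal := by
  intro pal _
  simp only [Spec_ordenar_pal, ordenar_pal, ordenar_pal_alt, sorted_bool, foldA_eq, List.nil_append]
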